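-- pv_equiv track=rewrite | github.com/melcoloy/kkbox | app.py | generer_emplacements
-- ===== SOURCE A (Python) =====
-- def generer_emplacements(largeur_grille, hauteur_grille):
--     grille_occupee = [[False] * largeur_grille for _ in range(hauteur_grille)]
--     emplacements = []
--
--     for y in range(hauteur_grille):
--         for x in range(largeur_grille):
--             if grille_occupee[y][x]:
--                 continue
--             if x + 1 < largeur_grille and not grille_occupee[y][x + 1]:
--                 emplacements.append(((x, y), (x + 1, y)))
--                 grille_occupee[y][x] = grille_occupee[y][x + 1] = True
--             elif y + 1 < hauteur_grille and not grille_occupee[y + 1][x]: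
--                 emplacements.append(((x, y), (x, y + 1)))
--                 grille_occupee[y][x] = grille_occupee[y + 1][x] = True
--     return emplacements
-- ===== SOURCE B (Python) =====
-- def generer_emplacements(largeur_grille, hauteur_grille):
--     emplacements = []
--     for y in range(hauteur_grille):
--         for x in range(0, largeur_grille - 1, 2):
--             emplacements.append(((x, y), (x + 1, y)))
--         if largeur_grille > 0 and largeur_grille % 2 == 1 and y % 2 == 0 and y + 1 < hauteur_grille:
--             emplacements.append(((largeur_grille - 1, y), (largeur_grille - 1, y + 1)))
--     return emplacements
-- ===== Notes on version B (the rewrite author's own statement) =====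
-- stated objective: simpler
-- what changed: B drops A's occupancy grid and neighbor checks entirely and emits the fixed greedy pattern directly: per row, horizontal dominoes at x = 0,2,... while x+1 < width, plus, when the width is odd, one vertical domino in the last column on even rows with y+1 < height.
import Mathlib
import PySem

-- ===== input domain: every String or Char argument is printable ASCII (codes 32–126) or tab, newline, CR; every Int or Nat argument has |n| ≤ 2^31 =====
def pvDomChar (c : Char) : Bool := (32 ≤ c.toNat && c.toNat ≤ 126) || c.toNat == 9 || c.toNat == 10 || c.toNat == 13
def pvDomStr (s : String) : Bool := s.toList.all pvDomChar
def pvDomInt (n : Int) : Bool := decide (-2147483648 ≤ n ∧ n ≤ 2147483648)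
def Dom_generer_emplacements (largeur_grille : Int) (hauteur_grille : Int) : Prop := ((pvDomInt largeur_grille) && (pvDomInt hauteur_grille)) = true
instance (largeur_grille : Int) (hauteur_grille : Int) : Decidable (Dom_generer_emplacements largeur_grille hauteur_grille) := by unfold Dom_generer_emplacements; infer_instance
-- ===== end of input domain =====

-- B replaces A's occupancy-grid greedy scan by directly emitting the fixed tiling pattern
-- (per-row horizontals, plus one last-column vertical on even rows when the width is odd);
-- objective: simpler (no grid, no neighbor checks; same cost).


-- ===== PORT A =====
-- Python g[y][x] / assignment g[y][x]=True; exact here because A only indexes with 0 <= y < len(g), 0 <= x < len(g[y])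
def pvGGet (g : List (List Bool)) (y x : Int) : Bool :=
  (g.getD y.toNat []).getD x.toNat false

def pvGSet (g : List (List Bool)) (y x : Int) : List (List Bool) :=
  g.set y.toNat ((g.getD y.toNat []).set x.toNat true)

-- body of A's inner loop (state = (grille_occupee, emplacements))
def pvStepA (largeur hauteur y : Int)
    (st : List (List Bool) × List ((Int × Int) × (Int × Int))) (x : Int) :
    List (List Bool) × List ((Int × Int) × (Int × Int)) :=
  if pvGGet st.1 y x then st
  else if x + 1 < largeur ∧ ¬ pvGGet st.1 y (x + 1) = true then
    (pvGSet (pvGSet st.1 y x) y (x + 1), st.2 ++ [((x, y), (x + 1, y))])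
  else if y + 1 < hauteur ∧ ¬ pvGGet st.1 (y + 1) x = true then
    (pvGSet (pvGSet st.1 y x) (y + 1) x, st.2 ++ [((x, y), (x, y + 1))])
  else st

def generer_emplacements (largeur_grille : Int) (hauteur_grille : Int) : List ((Int × Int) × (Int × Int)) :=
  ((PySem.List.pyRange 0 hauteur_grille 1).foldl
    (fun st y => (PySem.List.pyRange 0 largeur_grille 1).foldl (pvStepA largeur_grille hauteur_grille y) st)
    ((PySem.List.pyRange 0 hauteur_grille 1).map (fun _ => List.replicate largeur_grille.toNat false), [])).2

-- ===== PORT B =====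
def generer_emplacements_alt (largeur_grille : Int) (hauteur_grille : Int) : List ((Int × Int) × (Int × Int)) :=
  (PySem.List.pyRange 0 hauteur_grille 1).foldl
    (fun e y =>
      let e' := (PySem.List.pyRange 0 (largeur_grille - 1) 2).foldl
        (fun e x => e ++ [((x, y), (x + 1, y))]) e
      if 0 < largeur_grille ∧ PySem.Int.mod largeur_grille 2 = 1 ∧ PySem.Int.mod y 2 = 0 ∧ y + 1 < hauteur_grille then
        e' ++ [((largeur_grille - 1, y), (largeur_grille - 1, y + 1))]
      else e') []

-- ===== PRECONDITION & SPEC =====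
def Spec_generer_emplacements (largeur_grille : Int) (hauteur_grille : Int) (out : List ((Int × Int) × (Int × Int))) : Prop := out = generer_emplacements_alt largeur_grille hauteur_grille
instance (largeur_grille : Int) (hauteur_grille : Int) (out : List ((Int × Int) × (Int × Int))) : Decidable (Spec_generer_emplacements largeur_grille hauteur_grille out) := by unfold Spec_generer_emplacements; infer_instance

-- ===== CLAIM (what is proved, stated in full; the proofs are below) =====
def Claim_equal_generer_emplacements : Prop := ∀ (largeur_grille : Int) (hauteur_grille : Int), Dom_generer_emplacements largeur_grille hauteur_grille → Spec_generer_emplacements largeur_grille hauteur_grille (generer_emplacements largeur_grille hauteur_grille)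

-- ===== LEMMAS AND PROOFS =====

-- list micro-lemmas ---------------------------------------------------------
theorem pvGetD_append_len {a : Type} (P : List a) (r : a) (S : List a) (d : a) :
    (P ++ r :: S).getD P.length d = r := by
  induction P with
  | nil => rfl
  | cons p P ih => simpa using ih

theorem pvGetD_append_len_succ {a : Type} (P : List a) (r s : a) (S : List a) (d : a) :
    (P ++ r :: s :: S).getD (P.length + 1) d = s := by
  induction P with
  | nil => rfl
  | cons p P ih =>
    simpa only [List.cons_append, List.length_cons, List.getD_cons_succ] using ih

theorem pvSet_append_len {a : Type} (P : List a) (r : a) (S : List a) (v : a) :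
    (P ++ r :: S).set P.length v = P ++ v :: S := by
  induction P with
  | nil => rfl
  | cons p P ih => simpa [Nat.succ_add] using ih

theorem pvSet_append_len_succ {a : Type} (P : List a) (r s : a) (S : List a) (v : a) :
    (P ++ r :: s :: S).set (P.length + 1) v = P ++ r :: v :: S := by
  induction P with
  | nil => rfl
  | cons p P ih =>
    simp only [List.cons_append, List.length_cons, List.set_cons_succ, ih]

theorem pvGetD_replicate_false (n x : Nat) :
    (List.replicate n false).getD x false = false := by
  induction n generalizing x with
  | zero => cases x <;> rfl
  | succ n ih =>
    cases x with
    | zero => rfl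
    | succ x => simpa [List.replicate_succ] using ih x

theorem pvGetD_replicate_true (n x : Nat) (hx : x < n) :
    (List.replicate n true).getD x false = true := by
  induction n generalizing x with
  | zero => omega
  | succ n ih =>
    cases x with
    | zero => rfl
    | succ x => simpa [List.replicate_succ] using ih x (by omega)

theorem pvSet_replicate_false_last (n : Nat) (hn : 1 <= n) :
    (List.replicate n false).set (n - 1) true = List.replicate (n - 1) false ++ [true] := by
  have h : List.replicate n false = List.replicate (n-1) false ++ [false] := by
    rw [← List.replicate_succ' (n := n-1)]
    congr 1
    omega
  rw [h]
  have h2 := pvSet_append_len (List.replicate (n-1) false) false ([] : List Bool) true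
  simpa [List.length_replicate] using h2

theorem pvFoldl_id {a b : Type} (l : List a) (e : b) :
    l.foldl (fun s _ => s) e = e := by
  induction l generalizing e with
  | nil => rfl
  | cons x l ih => simpa using ih e

theorem pvFoldl_flat {a b : Type} (f : a → List b) (l : List a) (e : List b) :
    l.foldl (fun e x => e ++ f x) e = e ++ l.flatMap f := by
  induction l generalizing e with
  | nil => simp
  | cons x l ih => simp [ih, List.append_assoc]

-- row states of the greedy pattern ------------------------------------------
def pvRowMid (n j : Nat) (b : Bool) : List Bool :=
  List.replicate j true ++ List.replicate (n - 1 - j) false ++ [b]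

def pvProcRow (n m i : Nat) : List Bool :=
  if n % 2 = 1 ∧ i % 2 = 0 ∧ m <= i + 1 then List.replicate (n-1) true ++ [false]
  else List.replicate n true

def pvPendB (n y : Nat) : Bool := decide (n % 2 = 1 ∧ y % 2 = 1)

def pvGridAt (n m y : Nat) : List (List Bool) :=
  (List.range m).map (fun i =>
    if i < y then pvProcRow n m i
    else if i = y then pvRowMid n 0 (pvPendB n i)
    else List.replicate n false)

def pvSuffAfter (n m y : Nat) : List (List Bool) :=
  if n % 2 = 1 ∧ y % 2 = 0 ∧ y + 1 < m then
    (List.replicate (n-1) false ++ [true]) :: List.replicate (m - y - 2) (List.replicate n false)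
  else List.replicate (m - y - 1) (List.replicate n false)

def pvVEmit (n m y : Nat) : List ((Int × Int) × (Int × Int)) :=
  if n % 2 = 1 ∧ y % 2 = 0 ∧ y + 1 < m then [(((n:Int)-1, (y:Int)), ((n:Int)-1, (y:Int)+1))]
  else []

def pvHEmit (n : Nat) (y j : Int) : List ((Int × Int) × (Int × Int)) :=
  (PySem.List.pyRange j ((n:Int) - 1) 2).map (fun x => ((x, y), (x + 1, y)))

def pvRowEmitB (n m : Nat) (y : Int) : List ((Int × Int) × (Int × Int)) :=
  (PySem.List.pyRange 0 ((n:Int) - 1) 2).map (fun x => ((x, y), (x + 1, y))) ++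
  (if n % 2 = 1 ∧ y % 2 = 0 ∧ y + 1 < (m:Int) then [(((n:Int)-1, y), ((n:Int)-1, y+1))] else [])

-- step-2 range decomposition ------------------------------------------------
theorem pvPyRange_two_nil (a b : Int) (h : b <= a) : PySem.List.pyRange a b 2 = [] := by
  rw [PySem.List.pyRange_of_pos a b (by norm_num)]
  rw [if_neg (by omega : ¬ a < b)]
  rfl

theorem pvPyRange_two_cons (a b : Int) (h : a < b) :
    PySem.List.pyRange a b 2 = a :: PySem.List.pyRange (a + 2) b 2 := by
  rw [PySem.List.pyRange_of_pos a b (by norm_num), if_pos h]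
  by_cases h2 : a + 2 < b
  · rw [PySem.List.pyRange_of_pos (a+2) b (by norm_num), if_pos h2]
    have hN : ((b - a + 2 - 1) / 2).toNat = ((b - (a+2) + 2 - 1) / 2).toNat + 1 := by omega
    rw [hN, List.range_succ_eq_map, List.map_cons, List.map_map]
    congr 1
    · norm_num
    · apply List.map_congr_left
      intro k _
      simp only [Function.comp_apply, Nat.succ_eq_add_one]
      push_cast
      ring
  · rw [pvPyRange_two_nil _ _ (by omega)]
    have hN : ((b - a + 2 - 1) / 2).toNat = 1 := by omega
    rw [hN]
    simp [List.range_succ]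

-- reading / writing the row states ------------------------------------------
theorem pvRowMid_getD (n j x : Nat) (b : Bool) (hx : x <= n - 1) :
    (pvRowMid n j b).getD x false =
      if x < j then true else if x < n - 1 then false else b := by
  unfold pvRowMid
  rw [List.append_assoc]
  by_cases h1 : x < j
  · rw [if_pos h1, List.getD_append _ _ _ _ (by simpa using h1)]
    exact pvGetD_replicate_true j x h1
  · rw [if_neg h1, List.getD_append_right _ _ _ _ (by simpa using not_lt.mp h1)]
    by_cases h2 : x < n - 1
    · rw [if_pos h2, List.getD_append _ _ _ _ (by simp; omega)]
      exact pvGetD_replicate_false _ _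
    · rw [if_neg h2, List.getD_append_right _ _ _ _ (by simp; omega)]
      simp only [List.length_replicate]
      have hx0 : x - j - (n - 1 - j) = 0 := by omega
      rw [hx0]
      rfl

theorem pvRowMid_set (n j : Nat) (b : Bool) (hj : j < n - 1) :
    (pvRowMid n j b).set j true = pvRowMid n (j + 1) b := by
  unfold pvRowMid
  have h1 : List.replicate (n - 1 - j) false = false :: List.replicate (n - 1 - (j+1)) false := by
    rw [← List.replicate_succ]
    congr 1
    omega
  rw [h1, List.append_assoc, List.cons_append]
  have h2 := pvSet_append_len (List.replicate j true) false
      (List.replicate (n - 1 - (j+1)) false ++ [b]) true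
  rw [List.length_replicate] at h2
  rw [h2, List.replicate_succ']
  simp

theorem pvRowMid_last (n : Nat) (b : Bool) :
    pvRowMid n (n - 1) b = List.replicate (n - 1) true ++ [b] := by
  unfold pvRowMid
  simp

theorem pvRowMid_set_last (n : Nat) (b : Bool) (hn : 1 <= n) :
    (pvRowMid n (n - 1) b).set (n - 1) true = List.replicate n true := by
  rw [pvRowMid_last]
  have h2 := pvSet_append_len (List.replicate (n-1) true) b ([] : List Bool) true
  rw [List.length_replicate] at h2
  rw [h2, ← List.replicate_succ']
  congr 1
  omega

theorem pvRowMid_zero (n : Nat) (b : Bool) :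
    pvRowMid n 0 b = List.replicate (n - 1) false ++ [b] := by
  unfold pvRowMid
  simp

theorem pvRowMid_zero_false (n : Nat) (hn : 1 <= n) :
    pvRowMid n 0 false = List.replicate n false := by
  rw [pvRowMid_zero, ← List.replicate_succ']
  congr 1
  omega

-- grid access through pvGGet / pvGSet ---------------------------------------
theorem pvGGet_row (P : List (List Bool)) (r : List Bool) (S : List (List Bool))
    (y : Nat) (hP : P.length = y) (x : Nat) :
    pvGGet (P ++ r :: S) (y:Int) (x:Int) = r.getD x false := by
  unfold pvGGet
  rw [Int.toNat_natCast, Int.toNat_natCast, ← hP, pvGetD_append_len]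

theorem pvGGet_next (P : List (List Bool)) (r s : List Bool) (S : List (List Bool))
    (y : Nat) (hP : P.length = y) (x : Nat) :
    pvGGet (P ++ r :: s :: S) ((y:Int) + 1) (x:Int) = s.getD x false := by
  unfold pvGGet
  have h1 : ((y:Int) + 1).toNat = y + 1 := by omega
  rw [h1, Int.toNat_natCast, ← hP, pvGetD_append_len_succ]

theorem pvGSet_row (P : List (List Bool)) (r : List Bool) (S : List (List Bool))
    (y : Nat) (hP : P.length = y) (x : Nat) :
    pvGSet (P ++ r :: S) (y:Int) (x:Int) = P ++ r.set x true :: S := by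
  unfold pvGSet
  rw [Int.toNat_natCast, Int.toNat_natCast, ← hP, pvGetD_append_len, pvSet_append_len]

theorem pvGSet_next (P : List (List Bool)) (r s : List Bool) (S : List (List Bool))
    (y : Nat) (hP : P.length = y) (x : Nat) :
    pvGSet (P ++ r :: s :: S) ((y:Int) + 1) (x:Int) = P ++ r :: s.set x true :: S := by
  unfold pvGSet
  have h1 : ((y:Int) + 1).toNat = y + 1 := by omega
  rw [h1, Int.toNat_natCast, ← hP, pvGetD_append_len_succ, pvSet_append_len_succ]

-- the inner (per-row) loop ---------------------------------------------------
theorem pvInner (n m y : Nat) (hn : 1 <= n) (hym : y < m) :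
    ∀ K j, n - 1 - j = K → j <= n - 1 → j % 2 = 0 →
    ∀ (P : List (List Bool)), P.length = y →
    ∀ (e : List ((Int × Int) × (Int × Int))),
    (PySem.List.pyRange (j:Int) (n:Int) 1).foldl (pvStepA (n:Int) (m:Int) (y:Int))
      (P ++ pvRowMid n j (pvPendB n y) :: List.replicate (m - y - 1) (List.replicate n false), e)
    = (P ++ pvProcRow n m y :: pvSuffAfter n m y,
       e ++ pvHEmit n (y:Int) (j:Int) ++ pvVEmit n m y) := by
  intro K
  induction K using Nat.strong_induction_on with
  | _ K IH =>
  intro j hK hj hje P hP e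
  by_cases hcol : j = n - 1
  · -- last column: n is odd here
    have hnodd : n % 2 = 1 := by omega
    subst hcol
    have hr : PySem.List.pyRange ((n-1 : Nat) : Int) (n:Int) 1 = [((n-1:Nat):Int)] := by
      rw [PySem.List.pyRange_one_cons (by omega), PySem.List.pyRange_one_eq_nil (by omega)]
    rw [hr]
    simp only [List.foldl_cons, List.foldl_nil]
    have hEnil : pvHEmit n (y:Int) ((n-1:Nat):Int) = [] := by
      unfold pvHEmit
      rw [pvPyRange_two_nil _ _ (by omega)]
      rfl
    cases hb : pvPendB n y with
    | true =>
      have hyodd : y % 2 = 1 := by simp [pvPendB] at hb; omega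
      simp only [pvStepA]
      simp only [pvGGet_row P _ _ y hP (n-1),
        pvRowMid_getD n (n-1) (n-1) true (by omega), if_neg (by omega : ¬ (n-1 < n-1)),
        if_true]
      rw [hEnil]
      have hv : pvVEmit n m y = [] := by
        unfold pvVEmit
        rw [if_neg (by omega)]
      rw [hv]
      have hrow : pvRowMid n (n-1) true = pvProcRow n m y := by
        rw [pvRowMid_last]
        unfold pvProcRow
        rw [if_neg (by omega), show n = (n-1) + 1 from by omega, List.replicate_succ']
        simp
      have hsuf : List.replicate (m - y - 1) (List.replicate n false) = pvSuffAfter n m y := by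
        unfold pvSuffAfter
        rw [if_neg (by omega)]
      rw [hrow, hsuf]
      simp
    | false =>
      have hyev : y % 2 = 0 := by simp [pvPendB] at hb; omega
      simp only [pvStepA]
      simp only [pvGGet_row P _ _ y hP (n-1),
        pvRowMid_getD n (n-1) (n-1) false (by omega), if_neg (by omega : ¬ (n-1 < n-1))]
      simp only [if_neg (by simp : ¬ false = true)]
      rw [if_neg (by push_cast; intro h; omega :
        ¬ (((n-1:Nat):Int) + 1 < (n:Int) ∧ ¬ pvGGet (P ++ pvRowMid n (n-1) false ::
            List.replicate (m - y - 1) (List.replicate n false)) (y:Int) (((n-1:Nat):Int) + 1) = true))]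
      by_cases hv : y + 1 < m
      · have hS : List.replicate (m-y-1) (List.replicate n false)
            = List.replicate n false :: List.replicate (m-y-2) (List.replicate n false) := by
          rw [← List.replicate_succ]
          congr 1
          omega
        rw [hS]
        simp only [pvGGet_next P _ _ _ y hP (n-1), pvGetD_replicate_false,
          Bool.false_eq_true, not_false_eq_true, and_true]
        rw [if_pos (by omega : (y:Int) + 1 < (m:Int))]
        simp only [pvGSet_row P _ _ y hP (n-1), pvRowMid_set_last n false hn,
          pvGSet_next P _ _ _ y hP (n-1), pvSet_replicate_false_last n hn]
        have hrow : List.replicate n true = pvProcRow n m y := by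
          unfold pvProcRow
          rw [if_neg (by omega)]
        have hsuf : (List.replicate (n-1) false ++ [true]) ::
            List.replicate (m-y-2) (List.replicate n false) = pvSuffAfter n m y := by
          unfold pvSuffAfter
          rw [if_pos ⟨hnodd, hyev, hv⟩]
        have hvem : pvVEmit n m y = [(((n:Int)-1, (y:Int)), ((n:Int)-1, (y:Int)+1))] := by
          unfold pvVEmit
          rw [if_pos ⟨hnodd, hyev, hv⟩]
        rw [hrow, hsuf, hEnil, hvem]
        have hcast : ((n-1:Nat):Int) = (n:Int) - 1 := by omega
        rw [hcast]
        simp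
      · rw [if_neg (by intro h; exact absurd h.1 (by omega))]
        have hrow : pvRowMid n (n-1) false = pvProcRow n m y := by
          rw [pvRowMid_last]
          unfold pvProcRow
          rw [if_pos ⟨hnodd, hyev, by omega⟩]
        have hsuf : List.replicate (m - y - 1) (List.replicate n false) = pvSuffAfter n m y := by
          unfold pvSuffAfter
          rw [if_neg (by omega)]
        have hvem : pvVEmit n m y = [] := by
          unfold pvVEmit
          rw [if_neg (by omega)]
        rw [hrow, hsuf, hEnil, hvem]
        simp
  · -- horizontal step at column j
    have hjlt : j < n - 1 := by omega
    have hc1 : (j:Int) + 1 = ((j+1:Nat):Int) := by push_cast; ring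
    have hc2 : ((j+1:Nat):Int) + 1 = ((j+2:Nat):Int) := by push_cast; ring
    have hr : PySem.List.pyRange (j:Int) (n:Int) 1
        = (j:Int) :: ((j+1:Nat):Int) :: PySem.List.pyRange ((j+2:Nat):Int) (n:Int) 1 := by
      rw [PySem.List.pyRange_one_cons (by omega : (j:Int) < (n:Int)), hc1,
        PySem.List.pyRange_one_cons (by omega : ((j+1:Nat):Int) < (n:Int)), hc2]
    rw [hr]
    simp only [List.foldl_cons]
    -- first step: place the horizontal domino (j, j+1)
    simp only [pvStepA]
    simp only [pvGGet_row P _ _ y hP j,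
      pvRowMid_getD n j j _ (by omega), if_neg (by omega : ¬ (j < j)), if_pos hjlt]
    simp only [if_neg (by simp : ¬ false = true), hc1]
    simp only [pvGGet_row P _ _ y hP (j+1)]
    by_cases hj2 : j + 1 < n - 1
    · have hfree2 : (pvRowMid n j (pvPendB n y)).getD (j+1) false = false := by
        rw [pvRowMid_getD n j (j+1) _ (by omega), if_neg (by omega), if_pos hj2]
      rw [hfree2]
      simp only [Bool.false_eq_true, not_false_eq_true, and_true]
      rw [if_pos (by omega : ((j+1:Nat):Int) < (n:Int))]
      simp only [pvGSet_row P _ _ y hP j, pvRowMid_set n j _ hjlt,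
        pvGSet_row P _ _ y hP (j+1), pvRowMid_set n (j+1) _ hj2]
      -- second step: column j+1 is now occupied
      rw [show j + 1 + 1 = j + 2 from by omega]
      simp only [pvGGet_row P _ _ y hP (j+1),
        pvRowMid_getD n (j+2) (j+1) _ (by omega), if_pos (by omega : j+1 < j+2), if_true]
      rw [IH (n-1-(j+2)) (by omega) (j+2) rfl (by omega) (by omega) P hP
        (e ++ [(((j:Int), (y:Int)), (((j+1:Nat):Int), (y:Int)))])]
      have hEcons : pvHEmit n (y:Int) (j:Int)
          = (((j:Int), (y:Int)), ((j:Int) + 1, (y:Int))) :: pvHEmit n (y:Int) ((j+2:Nat):Int) := by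
        unfold pvHEmit
        rw [pvPyRange_two_cons (j:Int) ((n:Int)-1) (by omega),
          show (j:Int) + 2 = ((j+2:Nat):Int) from by push_cast; ring]
        simp
      rw [hEcons]
      rw [hc1]
      simp [List.append_assoc]
    · -- j+1 = n-1 and n even: still a horizontal (the pending bit is false)
      have hj1 : j + 1 = n - 1 := by omega
      have hnev : n % 2 = 0 := by omega
      have hbf : pvPendB n y = false := by simp [pvPendB]; omega
      have hfree2 : (pvRowMid n j (pvPendB n y)).getD (j+1) false = false := by
        rw [pvRowMid_getD n j (j+1) _ (by omega), if_neg (by omega), if_neg (by omega), hbf]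
      rw [hfree2]
      simp only [Bool.false_eq_true, not_false_eq_true, and_true]
      rw [if_pos (by omega : ((j+1:Nat):Int) < (n:Int))]
      simp only [pvGSet_row P _ _ y hP j, pvRowMid_set n j _ hjlt,
        pvGSet_row P _ _ y hP (j+1)]
      rw [show j + 1 = n - 1 from hj1, pvRowMid_set_last n _ hn]
      -- second step: column j+1 occupied
      simp only [pvGGet_row P _ _ y hP (n-1),
        pvGetD_replicate_true n (n-1) (by omega), if_true]
      rw [show ((j+2:Nat):Int) = ((n:Nat):Int) by omega,
        PySem.List.pyRange_one_eq_nil (by omega), List.foldl_nil]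
      have hrow : List.replicate n true = pvProcRow n m y := by
        unfold pvProcRow
        rw [if_neg (by omega)]
      have hsuf : List.replicate (m - y - 1) (List.replicate n false) = pvSuffAfter n m y := by
        unfold pvSuffAfter
        rw [if_neg (by omega)]
      have hvem : pvVEmit n m y = [] := by
        unfold pvVEmit
        rw [if_neg (by omega)]
      have hEone : pvHEmit n (y:Int) (j:Int) = [(((j:Int), (y:Int)), ((j:Int) + 1, (y:Int)))] := by
        unfold pvHEmit
        rw [pvPyRange_two_cons (j:Int) ((n:Int)-1) (by omega),
          pvPyRange_two_nil _ _ (by omega), List.map_cons, List.map_nil]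
      rw [hrow, hsuf, hvem, hEone, hc1]
      simp
      omega

-- grid decompositions --------------------------------------------------------
theorem pvGridAt_decomp (n m y : Nat) (hym : y < m) :
    pvGridAt n m y =
      (List.range y).map (fun i => pvProcRow n m i) ++
      pvRowMid n 0 (pvPendB n y) :: List.replicate (m - y - 1) (List.replicate n false) := by
  unfold pvGridAt
  apply List.ext_getElem
  · simp
    omega
  · intro i h1 h2
    simp only [List.getElem_map, List.getElem_range, List.getElem_append, List.getElem_cons,
      List.getElem_replicate, List.length_map, List.length_range]
    split_ifs <;> first
      | rfl
      | omega
      | (rename_i hlt heq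
         have : i = y := by omega
         subst this
         rfl)

theorem pvGridAt_top (n m : Nat) :
    pvGridAt n m m = (List.range m).map (fun i => pvProcRow n m i) := by
  unfold pvGridAt
  apply List.map_congr_left
  intro i hi
  rw [if_pos (List.mem_range.mp hi)]

theorem pvGridAt_succ (n m y : Nat) (hn : 1 <= n) (hym : y < m) :
    (List.range y).map (fun i => pvProcRow n m i) ++ pvProcRow n m y :: pvSuffAfter n m y
      = pvGridAt n m (y + 1) := by
  by_cases h2 : y + 1 < m
  · rw [pvGridAt_decomp n m (y+1) h2, List.range_succ, List.map_append]
    simp only [List.map_cons, List.map_nil, List.append_assoc, List.singleton_append]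
    congr 2
    unfold pvSuffAfter
    split_ifs with hv
    · have hb : pvPendB n (y+1) = true := by simp [pvPendB]; omega
      rw [hb, pvRowMid_zero, show m - (y+1) - 1 = m - y - 2 from by omega]
    · have hb : pvPendB n (y+1) = false := by simp [pvPendB]; omega
      rw [hb, pvRowMid_zero_false n hn]
      have hrep : m - y - 1 = (m - (y+1) - 1) + 1 := by omega
      rw [hrep, List.replicate_succ]
  · have hy1 : y + 1 = m := by omega
    rw [hy1, pvGridAt_top, ← hy1, List.range_succ, List.map_append]
    simp only [List.map_cons, List.map_nil]
    congr 2
    unfold pvSuffAfter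
    rw [if_neg (by omega)]
    have hrep : y + 1 - y - 1 = 0 := by omega
    rw [hrep]
    rfl

theorem pvRowEmitB_nat (n m y : Nat) :
    pvRowEmitB n m (y:Int) = pvHEmit n (y:Int) ((0:Nat):Int) ++ pvVEmit n m y := by
  unfold pvRowEmitB pvHEmit pvVEmit
  congr 1
  have hiff : (n % 2 = 1 ∧ (y:Int) % 2 = 0 ∧ (y:Int) + 1 < (m:Int)) ↔
      (n % 2 = 1 ∧ y % 2 = 0 ∧ y + 1 < m) := by omega
  simp only [hiff]

-- the outer (per-grid) loop --------------------------------------------------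
theorem pvOuter (n m : Nat) (hn : 1 <= n) :
    ∀ K y, m - y = K → y <= m →
    ∀ (e : List ((Int × Int) × (Int × Int))),
    (PySem.List.pyRange (y:Int) (m:Int) 1).foldl
        (fun st yy => (PySem.List.pyRange 0 (n:Int) 1).foldl (pvStepA (n:Int) (m:Int) yy) st)
        (pvGridAt n m y, e)
      = (pvGridAt n m m,
         e ++ (PySem.List.pyRange (y:Int) (m:Int) 1).flatMap (pvRowEmitB n m)) := by
  intro K
  induction K with
  | zero =>
    intro y hK hy e
    have hym : y = m := by omega
    subst hym
    rw [PySem.List.pyRange_one_eq_nil (le_refl _)]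
    simp
  | succ K ih =>
    intro y hK hy e
    have hym : y < m := by omega
    have hc : (y:Int) < (m:Int) := by exact_mod_cast hym
    rw [PySem.List.pyRange_one_cons hc]
    simp only [List.foldl_cons]
    rw [pvGridAt_decomp n m y hym]
    have hin := pvInner n m y hn hym (n-1) 0 rfl (by omega) (by omega)
      ((List.range y).map (fun i => pvProcRow n m i)) (by simp) e
    simp only [Nat.cast_zero] at hin
    rw [hin]
    rw [pvGridAt_succ n m y hn hym]
    have hy1 : (y:Int) + 1 = ((y+1 : Nat):Int) := by push_cast; ring
    rw [hy1, ih (y+1) (by omega) (by omega)]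
    have hrow : pvRowEmitB n m (y:Int) = pvHEmit n (y:Int) 0 ++ pvVEmit n m y := by
      have h := pvRowEmitB_nat n m y
      simpa using h
    rw [List.flatMap_cons, hrow]
    simp [List.append_assoc]

-- assembling the two sides ---------------------------------------------------
theorem pvFoldl_ext {a b : Type} (f g : b → a → b) (h : ∀ e y, f e y = g e y)
    (l : List a) (e : b) : l.foldl f e = l.foldl g e := by
  induction l generalizing e with
  | nil => rfl
  | cons x l ih => rw [List.foldl_cons, List.foldl_cons, h, ih]

theorem pvAlt_eq (n m : Nat) (hn : 1 <= n) :
    generer_emplacements_alt (n:Int) (m:Int)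
      = (PySem.List.pyRange 0 (m:Int) 1).flatMap (pvRowEmitB n m) := by
  unfold generer_emplacements_alt
  rw [pvFoldl_ext _ (fun e y => e ++ pvRowEmitB n m y) ?_ _ _]
  · rw [pvFoldl_flat]
    simp
  · intro e y
    show (if 0 < (n:Int) ∧ PySem.Int.mod (n:Int) 2 = 1 ∧ PySem.Int.mod y 2 = 0 ∧ y + 1 < (m:Int)
        then ((PySem.List.pyRange 0 ((n:Int) - 1) 2).foldl
            (fun e x => e ++ [((x, y), (x + 1, y))]) e) ++ [(((n:Int) - 1, y), ((n:Int) - 1, y + 1))]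
        else (PySem.List.pyRange 0 ((n:Int) - 1) 2).foldl
            (fun e x => e ++ [((x, y), (x + 1, y))]) e)
      = e ++ pvRowEmitB n m y
    rw [PySem.List.foldl_append_singleton_eq_map]
    unfold pvRowEmitB
    have hmod : ∀ a : Int, PySem.Int.mod a 2 = a % 2 :=
      fun a => PySem.Int.mod_eq_emod_of_pos (by norm_num)
    simp only [hmod]
    have hiff : (0 < (n:Int) ∧ (n:Int) % 2 = 1 ∧ y % 2 = 0 ∧ y + 1 < (m:Int)) ↔
        (n % 2 = 1 ∧ y % 2 = 0 ∧ y + 1 < (m:Int)) := by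
      constructor
      · rintro ⟨h0, h1, hy2, h3⟩
        exact ⟨by omega, hy2, h3⟩
      · rintro ⟨h1, hy2, h3⟩
        exact ⟨by omega, by omega, hy2, h3⟩
    simp only [hiff]
    split_ifs with h
    · simp [List.append_assoc]
    · simp

theorem pvMain_pos (n m : Nat) (hn : 1 <= n) (hm : 1 <= m) :
    generer_emplacements (n:Int) (m:Int) = generer_emplacements_alt (n:Int) (m:Int) := by
  rw [pvAlt_eq n m hn]
  unfold generer_emplacements
  have hgrid : pvGridAt n m 0 = List.replicate m (List.replicate n false) := by
    rw [pvGridAt_decomp n m 0 (by omega)]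
    simp only [List.range_zero, List.map_nil, List.nil_append]
    rw [show pvPendB n 0 = false from by simp [pvPendB], pvRowMid_zero_false n hn,
      show m - 0 - 1 = m - 1 from by omega, ← List.replicate_succ,
      show (m - 1) + 1 = m from by omega]
  have hg0 : (PySem.List.pyRange 0 (m:Int) 1).map
      (fun _ => List.replicate ((n:Int)).toNat false) = pvGridAt n m 0 := by
    rw [List.map_const', PySem.List.length_pyRange_one, Int.toNat_natCast, hgrid,
      show ((m:Int) - 0).toNat = m from by omega]
  rw [hg0]
  have hout := pvOuter n m hn m 0 (by omega) (by omega) []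
  simp only [Nat.cast_zero] at hout
  rw [hout]
  simp

theorem pvMainTheorem (L H : Int) :
    Spec_generer_emplacements L H (generer_emplacements L H) := by
  unfold Spec_generer_emplacements
  by_cases hH : H <= 0
  · unfold generer_emplacements generer_emplacements_alt
    rw [PySem.List.pyRange_one_eq_nil hH]
    rfl
  · by_cases hL : L <= 0
    · unfold generer_emplacements generer_emplacements_alt
      rw [PySem.List.pyRange_one_eq_nil hL, pvPyRange_two_nil (0:Int) (L-1) (by omega)]
      have hc : ∀ y : Int, ¬ (0 < L ∧ PySem.Int.mod L 2 = 1 ∧ PySem.Int.mod y 2 = 0 ∧ y + 1 < H) :=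
        fun y hy => absurd hy.1 (by omega)
      simp only [List.foldl_nil, hc, if_false]
      rw [pvFoldl_id, pvFoldl_id]
    · have h1 : L = ((L.toNat : Nat) : Int) := by omega
      have h2 : H = ((H.toNat : Nat) : Int) := by omega
      rw [h1, h2]
      exact pvMain_pos L.toNat H.toNat (by omega) (by omega)

-- ===== VERDICT (by name: the statement is the Claim_ definition above) =====
theorem generer_emplacements_spec : Claim_equal_generer_emplacements := by
  intro L H _
  exact pvMainTheorem L H
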